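-- pv_equiv track=rewrite | github.com/Wqf2004/2025winter_vacation | Josephus_Problem/streamlit_app/app.py | reverse_josephus_visual
-- ===== SOURCE A (Python) =====
-- from typing import List, Tuple
--
-- def reverse_josephus_visual(n: int, m: int, x: int) -> Tuple[int, List[str]]:
--     """反Josephus环问题"""
--     for k in range(1, n + 1):
--         people = list(range(n))
--         current = k - 1
--
--         for _ in range(n - 1):
--             current = (current + m - 1) % len(people)
--             people.pop(current)
--
--         if people[0] + 1 == x:
--             return k, [f"从第{k}人开始，第{x}人最后出列"]
--
--     return -1, []
-- ===== SOURCE B (Python) =====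
-- from typing import List, Tuple
--
-- def reverse_josephus_visual(n: int, m: int, x: int) -> Tuple[int, List[str]]:
--     """反Josephus环问题 — O(n) Josephus recurrence, then invert the start rotation."""
--     if n < 1 or not (1 <= x <= n):
--         return -1, []
--     j = 0
--     for i in range(2, n + 1):
--         j = (j + m) % i
--     k = (x - 1 - j) % n + 1
--     return k, [f"从第{k}人开始，第{x}人最后出列"]
-- ===== Notes on version B (the rewrite author's own statement) =====
-- stated objective: faster
-- what changed: A brute-forces every start position k and simulates the whole elimination circle with repeated list.pop for each (O(n^3)); B computes the Josephus survivor once with the O(n) recurrence J(1)=0, J(i)=(J(i-1)+m)%i and inverts the start rotation to solve for k directly in closed form.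
import Mathlib
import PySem

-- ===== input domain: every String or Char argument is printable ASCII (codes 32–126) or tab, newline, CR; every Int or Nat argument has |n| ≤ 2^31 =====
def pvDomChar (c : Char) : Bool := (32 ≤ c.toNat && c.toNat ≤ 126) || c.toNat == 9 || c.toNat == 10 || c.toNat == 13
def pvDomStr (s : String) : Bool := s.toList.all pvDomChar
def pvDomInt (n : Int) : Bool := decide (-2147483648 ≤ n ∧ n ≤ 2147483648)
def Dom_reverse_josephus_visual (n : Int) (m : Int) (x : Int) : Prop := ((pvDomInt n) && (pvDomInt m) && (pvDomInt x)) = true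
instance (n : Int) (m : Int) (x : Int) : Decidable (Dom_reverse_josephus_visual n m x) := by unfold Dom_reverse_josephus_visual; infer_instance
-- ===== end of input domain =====

-- B replaces A's O(n^3) brute-force search over all start positions by the O(n) Josephus
-- recurrence followed by a direct inversion of the start rotation (objective: faster).

-- ===== PORT A =====
-- the f-string f"从第{k}人开始，第{x}人最后出列" (identical in A and B, so shared by both ports)
def pvMsg (k : Int) (x : Int) : String :=
  "从第" ++ PySem.Int.toStr k ++ "人开始，第" ++ PySem.Int.toStr x ++ "人最后出列"

-- one pass of A's inner loop body: current = (current + m - 1) % len(people); people.pop(current)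
-- (the pop index is always in range — the mod is by the positive current length — so
--  people.pop(current) is exactly List.eraseIdx at that index)
def pvStepA (m : Int) (s : List Int × Int) : List Int × Int :=
  let c := PySem.Int.mod (s.2 + m - 1) ((s.1.length : Int))
  (s.1.eraseIdx c.toNat, c)

-- 'for _ in range(n-1): …' — the loop variable is unused, so the loop is (n-1).toNat iterations
def pvIterA (m : Int) : Nat → List Int × Int → List Int × Int
  | 0, s => s
  | t + 1, s => pvIterA m t (pvStepA m s)

-- A's outer 'for k in range(1, n+1)' with its early return
def pvLoopA (n : Int) (m : Int) (x : Int) : List Int → Int × List String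
  | [] => (-1, [])
  | k :: rest =>
    let people := PySem.List.pyRange 0 n 1
    let r := pvIterA m (n - 1).toNat (people, k - 1)
    -- people[0]: after the n-1 pops the list is the nonempty singleton of the survivor
    if (PySem.List.pyGet? r.1 0).getD 0 + 1 = x then (k, [pvMsg k x])
    else pvLoopA n m x rest

def reverse_josephus_visual (n : Int) (m : Int) (x : Int) : Int × List String :=
  pvLoopA n m x (PySem.List.pyRange 1 (n + 1) 1)

-- ===== PORT B =====
def reverse_josephus_visual_alt (n : Int) (m : Int) (x : Int) : Int × List String :=
  if n < 1 ∨ ¬ (1 ≤ x ∧ x ≤ n) then (-1, [])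
  else
    let j := (PySem.List.pyRange 2 (n + 1) 1).foldl (fun j i => PySem.Int.mod (j + m) i) 0
    let k := PySem.Int.mod (x - 1 - j) n + 1
    (k, [pvMsg k x])

-- ===== PRECONDITION & SPEC =====
def Spec_reverse_josephus_visual (n : Int) (m : Int) (x : Int) (out : Int × List String) : Prop := out = reverse_josephus_visual_alt n m x
instance (n : Int) (m : Int) (x : Int) (out : Int × List String) : Decidable (Spec_reverse_josephus_visual n m x out) := by unfold Spec_reverse_josephus_visual; infer_instance

-- ===== CLAIM (what is proved, stated in full; the proofs are below) =====
def Claim_equal_reverse_josephus_visual : Prop := ∀ (n : Int) (m : Int) (x : Int), Dom_reverse_josephus_visual n m x → Spec_reverse_josephus_visual n m x (reverse_josephus_visual n m x)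

-- ===== LEMMAS AND PROOFS =====

-- the classical Josephus recurrence J(1)=0, J(i) = (J(i-1)+m) mod i
def pvJ (m : Int) : Nat → Int
  | 0 => 0
  | i + 1 => PySem.Int.mod (pvJ m i + m) ((i : Int) + 1)

lemma pvJ_bounds (m : Int) (L : Nat) (hL : 0 < L) : 0 ≤ pvJ m L ∧ pvJ m L < (L : Int) := by
  obtain ⟨t, rfl⟩ : ∃ t, L = t + 1 := ⟨L - 1, by omega⟩
  have hpos : (0 : Int) < (t : Int) + 1 := by positivity
  have h1 := PySem.Int.mod_nonneg (pvJ m t + m) hpos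
  have h2 := PySem.Int.mod_lt (pvJ m t + m) hpos
  rw [show pvJ m (t + 1) = PySem.Int.mod (pvJ m t + m) ((t : Int) + 1) from rfl]
  refine ⟨h1, ?_⟩
  push_cast
  linarith

lemma pvJ_succ (m : Int) (L : Nat) : pvJ m (L + 1) = (pvJ m L + m) % ((L : Int) + 1) := by
  rw [pvJ, PySem.Int.mod_eq_emod_of_pos (by positivity)]

-- the survivor of A's elimination loop on any list xs, starting count at position c
lemma pvSurvivor (m : Int) : ∀ (L : Nat) (xs : List Int) (c : Int), 0 < L → xs.length = L →
    (pvIterA m (L - 1) (xs, c)).1 =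
      [xs.getD (((c + pvJ m L) % (L : Int)).toNat) 0] := by
  intro L
  induction L with
  | zero => omega
  | succ L ih =>
    intro xs c _ hlen
    by_cases hL : L = 0
    · subst hL
      obtain ⟨a, rfl⟩ : ∃ a, xs = [a] := by
        cases xs with
        | nil => simp at hlen
        | cons a t => cases t with
          | nil => exact ⟨a, rfl⟩
          | cons b u => simp at hlen
      simp [pvIterA]
    have hLpos : 0 < L := Nat.pos_of_ne_zero hL
    have hstep : (L + 1) - 1 = (L - 1) + 1 := by omega
    rw [hstep, pvIterA]
    set K : Int := (L : Int) + 1 with hK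
    have hKpos : (0 : Int) < K := by positivity
    have hlenK : ((xs.length : Int)) = K := by rw [hlen]; push_cast; ring
    -- the first popped position
    set p : Int := (c + m - 1) % K with hp
    have hp0 : 0 ≤ p := Int.emod_nonneg _ (by omega)
    have hpK : p < K := Int.emod_lt_of_pos _ hKpos
    have hstepA : pvStepA m (xs, c) = (xs.eraseIdx p.toNat, p) := by
      simp only [pvStepA, hlenK, PySem.Int.mod_eq_emod_of_pos hKpos]
      rw [← hp]
    rw [hstepA]
    have hlen' : (xs.eraseIdx p.toNat).length = L := by
      rw [List.length_eraseIdx]; rw [hlen]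
      have : p.toNat < L + 1 := by omega
      simp [this]
    rw [ih _ p hLpos hlen']
    -- index arithmetic: the surviving element is the same in xs and in xs.eraseIdx p
    set j : Int := pvJ m L with hj
    obtain ⟨hj0, hjL⟩ := pvJ_bounds m L hLpos
    have hJsucc : pvJ m (L + 1) = (j + m) % K := pvJ_succ m L
    have hT : (c + pvJ m (L + 1)) % K = (p + 1 + j) % K := by
      rw [hJsucc]
      calc (c + (j + m) % K) % K
          = ((j + m) % K + c) % K := by ring_nf
        _ = (j + m + c) % K := Int.emod_add_emod _ _ _
        _ = ((c + m - 1) + (1 + j)) % K := by ring_nf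
        _ = (p + (1 + j)) % K := (Int.emod_add_emod _ _ _).symm
        _ = (p + 1 + j) % K := by ring_nf
    rw [show (((L + 1 : Nat)) : Int) = K from by push_cast; ring, hT]
    by_cases hcase : p + 1 + j < K
    · -- no wraparound: survivor sits after the popped position
      have hT' : (p + 1 + j) % K = p + 1 + j := Int.emod_eq_of_lt (by omega) hcase
      have hr : (p + j) % (L : Int) = p + j := Int.emod_eq_of_lt (by omega) (by omega)
      rw [hT', hr]
      congr 1
      have hb1 : (p + j).toNat < (xs.eraseIdx p.toNat).length := by rw [hlen']; omega
      have hb2 : (p + 1 + j).toNat < xs.length := by rw [hlen]; omega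
      rw [List.getD_eq_getElem _ _ hb1, List.getD_eq_getElem _ _ hb2,
        List.getElem_eraseIdx]
      have hge : ¬ ((p + j).toNat < p.toNat) := by omega
      rw [dif_neg hge]
      congr 1
      omega
    · -- wraparound: survivor sits before the popped position
      have hT' : (p + 1 + j) % K = p + 1 + j - K := by
        rw [← Int.sub_emod_right (p + 1 + j) K]
        exact Int.emod_eq_of_lt (by omega) (by omega)
      have hr : (p + j) % (L : Int) = p + j - L := by
        rw [← Int.sub_emod_right (p + j) (L : Int)]
        exact Int.emod_eq_of_lt (by omega) (by omega)
      rw [hT', hr]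
      congr 1
      have hb1 : (p + j - L).toNat < (xs.eraseIdx p.toNat).length := by rw [hlen']; omega
      have hb2 : (p + 1 + j - K).toNat < xs.length := by rw [hlen]; omega
      rw [List.getD_eq_getElem _ _ hb1, List.getD_eq_getElem _ _ hb2,
        List.getElem_eraseIdx]
      have hlt : (p + j - L).toNat < p.toNat := by omega
      rw [dif_pos hlt]
      congr 1
      omega

-- the value A's test 'people[0] + 1 == x' reads, for a given start k, in closed form
lemma pvSurvVal (n m k : Int) (hn : 1 ≤ n) :
    (PySem.List.pyGet? (pvIterA m (n - 1).toNat (PySem.List.pyRange 0 n 1, k - 1)).1 0).getD 0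
      = (k - 1 + pvJ m n.toNat) % n := by
  set L : Nat := n.toNat with hLdef
  have hLn : (L : Int) = n := by omega
  have hLpos : 0 < L := by omega
  have hlen : (PySem.List.pyRange 0 n 1).length = L := by
    rw [PySem.List.length_pyRange_one]; omega
  have hn1 : (n - 1).toNat = L - 1 := by omega
  rw [hn1, pvSurvivor m L _ (k - 1) hLpos hlen]
  set T : Int := (k - 1 + pvJ m L) % (L : Int) with hTdef
  have hT0 : 0 ≤ T := Int.emod_nonneg _ (by omega)
  have hTL : T < (L : Int) := Int.emod_lt_of_pos _ (by omega)
  rw [PySem.List.pyGet?_zero_cons, Option.getD_some]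
  have hb : T.toNat < (PySem.List.pyRange 0 n 1).length := by omega
  rw [List.getD_eq_getElem _ _ hb, PySem.List.getElem_pyRange_one]
  rw [hLn] at hTdef
  omega

-- the unique start position passing A's test, when 1 ≤ x ≤ n
lemma pvCondIff (n J k x : Int) (_hn : 0 < n) (_hJ0 : 0 ≤ J) (_hJn : J < n)
    (hk1 : 1 ≤ k) (hkn : k ≤ n) (hx1 : 1 ≤ x) (hxn : x ≤ n) :
    ((k - 1 + J) % n + 1 = x) ↔ k = (x - 1 - J) % n + 1 := by
  constructor
  · intro h
    have h' : (k - 1 + J) % n = x - 1 := by omega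
    have : (x - 1 - J) % n = k - 1 := by
      calc (x - 1 - J) % n = ((k - 1 + J) % n + (-J)) % n := by rw [h']; ring_nf
        _ = (k - 1 + J + (-J)) % n := Int.emod_add_emod _ _ _
        _ = (k - 1) % n := by ring_nf
        _ = k - 1 := Int.emod_eq_of_lt (by omega) (by omega)
    omega
  · intro h
    have : (k - 1 + J) % n = x - 1 := by
      have hk' : k - 1 = (x - 1 - J) % n := by omega
      calc (k - 1 + J) % n = ((x - 1 - J) % n + J) % n := by rw [hk']
        _ = (x - 1 - J + J) % n := Int.emod_add_emod _ _ _
        _ = (x - 1) % n := by ring_nf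
        _ = x - 1 := Int.emod_eq_of_lt (by omega) (by omega)
    omega

lemma pvLoopA_cons (n m x k : Int) (rest : List Int) :
    pvLoopA n m x (k :: rest) =
      if (PySem.List.pyGet? (pvIterA m (n - 1).toNat (PySem.List.pyRange 0 n 1, k - 1)).1 0).getD 0 + 1 = x
      then (k, [pvMsg k x]) else pvLoopA n m x rest := rfl

-- when no start position passes the test, A falls through to (-1, [])
lemma pvLoopA_none (n m x : Int) : ∀ (l : List Int),
    (∀ k ∈ l, ¬ ((PySem.List.pyGet? (pvIterA m (n - 1).toNat (PySem.List.pyRange 0 n 1, k - 1)).1 0).getD 0 + 1 = x)) →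
    pvLoopA n m x l = (-1, []) := by
  intro l
  induction l with
  | nil => intro _; rfl
  | cons k rest ih =>
    intro h
    rw [pvLoopA_cons, if_neg (h k (List.mem_cons_self))]
    exact ih (fun a ha => h a (List.mem_cons_of_mem _ ha))

-- B's fold computes the Josephus recurrence
lemma pvFoldJ (m : Int) : ∀ (L : Nat), 1 ≤ L →
    (PySem.List.pyRange 2 ((L : Int) + 1) 1).foldl (fun j i => PySem.Int.mod (j + m) i) 0 = pvJ m L := by
  intro L
  induction L with
  | zero => omega
  | succ L ih =>
    intro _
    by_cases hL : L = 0
    · subst hL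
      rw [show ((1 : Nat) : Int) + 1 = 2 by norm_num, PySem.List.pyRange_one_eq_nil (le_refl 2)]
      simp [pvJ, PySem.Int.mod_eq_emod_of_pos]
    have hL1 : 1 ≤ L := by omega
    have hsplit : PySem.List.pyRange 2 (((L : Int) + 1) + 1) 1 =
        PySem.List.pyRange 2 ((L : Int) + 1) 1 ++ [(L : Int) + 1] :=
      PySem.List.pyRange_one_succ_right (by omega)
    rw [show (((L + 1 : Nat)) : Int) + 1 = ((L : Int) + 1) + 1 by push_cast; ring, hsplit,
      List.foldl_append, ih hL1]
    simp [pvJ]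

-- A's loop, entered at start position a ≤ k*, returns at k* (where the test first — and only — passes)
lemma pvLoopA_reach (n m x : Int) (hn : 1 ≤ n) (hx1 : 1 ≤ x) (hxn : x ≤ n) :
    ∀ (t : Nat) (a : Int), 1 ≤ a → a ≤ (x - 1 - pvJ m n.toNat) % n + 1 →
    ((x - 1 - pvJ m n.toNat) % n + 1) - a = (t : Int) →
    pvLoopA n m x (PySem.List.pyRange a (n + 1) 1) =
      ((x - 1 - pvJ m n.toNat) % n + 1, [pvMsg ((x - 1 - pvJ m n.toNat) % n + 1) x]) := by
  set J : Int := pvJ m n.toNat with hJdef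
  obtain ⟨hJ0, hJn⟩ : 0 ≤ J ∧ J < n := by
    have := pvJ_bounds m n.toNat (by omega)
    constructor
    · exact this.1
    · have := this.2; omega
  set ks : Int := (x - 1 - J) % n + 1 with hks
  have hks1 : 1 ≤ ks := by
    have := Int.emod_nonneg (x - 1 - J) (show n ≠ 0 by omega); omega
  have hksn : ks ≤ n := by
    have := Int.emod_lt_of_pos (x - 1 - J) (show (0:Int) < n by omega); omega
  intro t
  induction t with
  | zero =>
    intro a ha1 _ hdist
    have haks : a = ks := by omega
    rw [haks, PySem.List.pyRange_one_cons (by omega), pvLoopA_cons, pvSurvVal n m ks hn]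
    rw [if_pos (by
      rw [pvCondIff n J ks x (by omega) hJ0 hJn (by omega) (by omega) hx1 hxn])]
  | succ t ih =>
    intro a ha1 haks hdist
    have halt : a < ks := by omega
    rw [PySem.List.pyRange_one_cons (by omega), pvLoopA_cons, pvSurvVal n m a hn]
    rw [if_neg (by
      rw [pvCondIff n J a x (by omega) hJ0 hJn (by omega) (by omega) hx1 hxn]
      omega)]
    exact ih (a + 1) (by omega) (by omega) (by omega)

-- ===== VERDICT (by name: the statement is the Claim_ definition above) =====
theorem reverse_josephus_visual_spec : Claim_equal_reverse_josephus_visual := by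
  intro n m x _
  unfold Spec_reverse_josephus_visual reverse_josephus_visual reverse_josephus_visual_alt
  by_cases hn : n < 1
  · rw [PySem.List.pyRange_one_eq_nil (by omega), if_pos (Or.inl hn)]
    rfl
  replace hn : 1 ≤ n := by omega
  by_cases hx : 1 ≤ x ∧ x ≤ n
  · rw [if_neg (fun hcon => by rcases hcon with h | h <;> omega)]
    have hLn : ((n.toNat : Int)) = n := by omega
    have hfold : (PySem.List.pyRange 2 (n + 1) 1).foldl (fun j i => PySem.Int.mod (j + m) i) 0
        = pvJ m n.toNat := by
      rw [← hLn]; exact pvFoldJ m n.toNat (by omega)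
    simp only [hfold, PySem.Int.mod_eq_emod_of_pos (show (0:Int) < n by omega)]
    have hks1 : 1 ≤ (x - 1 - pvJ m n.toNat) % n + 1 := by
      have := Int.emod_nonneg (x - 1 - pvJ m n.toNat) (show n ≠ 0 by omega); omega
    exact pvLoopA_reach n m x hn hx.1 hx.2 ((x - 1 - pvJ m n.toNat) % n + 1 - 1).toNat 1
      (le_refl 1) hks1 (by omega)
  · rw [if_pos (Or.inr hx)]
    apply pvLoopA_none
    intro k hk
    rw [PySem.List.mem_pyRange_one] at hk
    rw [pvSurvVal n m k hn]
    obtain ⟨hJ0, hJn⟩ : 0 ≤ pvJ m n.toNat ∧ pvJ m n.toNat < (n.toNat : Int) :=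
      pvJ_bounds m n.toNat (by omega)
    have h0 := Int.emod_nonneg (k - 1 + pvJ m n.toNat) (show n ≠ 0 by omega)
    have h1 := Int.emod_lt_of_pos (k - 1 + pvJ m n.toNat) (show (0:Int) < n by omega)
    omega
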